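-- pv_equiv track=rewrite | github.com/antho77m/Azul | Azul_sys_entre_manche.py | compte_point_plancher
-- ===== SOURCE A (Python) =====
-- def compte_point_plancher(plancher,point_plancher):
--     #renvoit les point stocker dans le placher
--     equivalent_point_plancher=[-1,-1,-2,-2,-2,-3,-3]
--
--     for i in range(len(plancher)):
--         if plancher[i]!=0 :
--             point_plancher+=equivalent_point_plancher[i]
--         else:
--             break
--     return point_plancher
-- ===== SOURCE B (Python) =====
-- def compte_point_plancher(plancher, point_plancher):
--     # cumulative_penalty[k] = total penalty for k occupied floor cells
--     cumulative_penalty = [0, -1, -2, -4, -6, -8, -11, -14]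
--     occupied = 0
--     while occupied < len(plancher) and plancher[occupied] != 0:
--         occupied += 1
--     return point_plancher + cumulative_penalty[occupied]
-- ===== Notes on version B (the rewrite author's own statement) =====
-- stated objective: alternative
-- what changed: Replaces per-cell penalty accumulation by counting the occupied prefix and a single lookup in a precomputed cumulative-penalty table; Pre_ excludes floors of length > 7 whose first 8 cells are all non-zero, on which both programs raise IndexError.
import Mathlib
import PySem

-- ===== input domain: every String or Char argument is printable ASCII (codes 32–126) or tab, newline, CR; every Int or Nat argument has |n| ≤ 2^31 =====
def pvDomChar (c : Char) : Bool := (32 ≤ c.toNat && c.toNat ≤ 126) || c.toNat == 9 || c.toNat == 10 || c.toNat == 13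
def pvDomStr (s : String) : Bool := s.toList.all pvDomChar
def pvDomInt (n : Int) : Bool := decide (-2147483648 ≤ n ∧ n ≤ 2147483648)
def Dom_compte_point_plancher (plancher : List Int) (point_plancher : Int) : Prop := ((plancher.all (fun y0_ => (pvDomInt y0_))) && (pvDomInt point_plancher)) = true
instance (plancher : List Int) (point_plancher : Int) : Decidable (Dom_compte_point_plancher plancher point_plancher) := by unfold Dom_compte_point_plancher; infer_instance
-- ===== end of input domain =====

-- B counts the occupied prefix and looks the total penalty up in a precomputed cumulative table (alternative decomposition, same cost).

-- ===== PORT A =====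
-- A's constant per-cell penalty table
def pvEqTable : List Int := [-1, -1, -2, -2, -2, -3, -3]

-- A's loop: walk the floor with its index, add the per-cell penalty until the first 0 (break).
-- Inside Pre_ the index stays < 7, so pyGetD never takes its default.
def pvALoop : List Int → Nat → Int → Int
  | [], _, acc => acc
  | v :: rest, i, acc =>
    if v ≠ 0 then pvALoop rest (i + 1) (acc + PySem.List.pyGetD pvEqTable (Int.ofNat i) 0)
    else acc

def compte_point_plancher (plancher : List Int) (point_plancher : Int) : Int :=
  pvALoop plancher 0 point_plancher

-- ===== PORT B =====
-- B's precomputed cumulative penalty table: entry k = total penalty for k occupied cells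
def pvCumTable : List Int := [0, -1, -2, -4, -6, -8, -11, -14]

-- B's while loop: count the leading non-zero cells
def pvCountOccupied : List Int → Nat
  | [] => 0
  | v :: rest => if v ≠ 0 then 1 + pvCountOccupied rest else 0

-- Inside Pre_ the count is ≤ 7, so pyGetD never takes its default.
def compte_point_plancher_alt (plancher : List Int) (point_plancher : Int) : Int :=
  point_plancher + PySem.List.pyGetD pvCumTable (Int.ofNat (pvCountOccupied plancher)) 0

-- ===== PRECONDITION & SPEC =====
-- Pre_ excludes exactly the inputs on which A (and B) raise IndexError: more than
-- 7 cells with the first 8 all non-zero, so index 7 of the 7-entry table is read.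
def Pre_compte_point_plancher (plancher : List Int) (point_plancher : Int) : Prop :=
  ¬ (7 < plancher.length ∧ ∀ v ∈ plancher.take 8, v ≠ 0)
instance (plancher : List Int) (point_plancher : Int) : Decidable (Pre_compte_point_plancher plancher point_plancher) := by unfold Pre_compte_point_plancher; infer_instance

def pvWitness_compte_point_plancher : List Int × Int := ([1, 2, 0, 5], 3)

def Spec_compte_point_plancher (plancher : List Int) (point_plancher : Int) (out : Int) : Prop := out = compte_point_plancher_alt plancher point_plancher
instance (plancher : List Int) (point_plancher : Int) (out : Int) : Decidable (Spec_compte_point_plancher plancher point_plancher out) := by unfold Spec_compte_point_plancher; infer_instance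

-- ===== CLAIM (what is proved, stated in full; the proofs are below) =====
def Claim_equal_compte_point_plancher : Prop := ∀ (plancher : List Int) (point_plancher : Int), Dom_compte_point_plancher plancher point_plancher → Pre_compte_point_plancher plancher point_plancher → Spec_compte_point_plancher plancher point_plancher (compte_point_plancher plancher point_plancher)

-- ===== LEMMAS AND PROOFS =====
-- step identity between the two tables, for all in-range indices
theorem pvTable_step : ∀ i < 7,
    PySem.List.pyGetD pvEqTable (Int.ofNat i) 0 =
      PySem.List.pyGetD pvCumTable (Int.ofNat (i + 1)) 0 -
        PySem.List.pyGetD pvCumTable (Int.ofNat i) 0 := by decide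

-- a lower bound on the occupied count forces a long all-non-zero prefix
theorem pvCount_ge (n : Nat) (l : List Int) (h : n ≤ pvCountOccupied l) :
    n ≤ l.length ∧ ∀ v ∈ l.take n, v ≠ 0 := by
  induction l generalizing n with
  | nil =>
    simp [pvCountOccupied] at h
    subst h; simp
  | cons v rest ih =>
    by_cases hv : v = 0
    · simp [pvCountOccupied, hv] at h
      subst h; simp
    · simp only [pvCountOccupied, if_pos hv] at h
      cases n with
      | zero => simp
      | succ m =>
        have hm : m ≤ pvCountOccupied rest := by omega
        obtain ⟨h1, h2⟩ := ih m hm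
        refine ⟨by simpa using Nat.succ_le_succ h1, ?_⟩
        intro x hx
        simp [List.take_succ_cons] at hx
        rcases hx with rfl | hx
        · exact hv
        · exact h2 x hx

-- A's loop from index i equals acc plus the cumulative-table difference, while in range
theorem pvALoop_eq (plancher : List Int) :
    ∀ (i : Nat) (acc : Int), i + pvCountOccupied plancher ≤ 7 →
      pvALoop plancher i acc =
        acc + (PySem.List.pyGetD pvCumTable (Int.ofNat (i + pvCountOccupied plancher)) 0 -
               PySem.List.pyGetD pvCumTable (Int.ofNat i) 0) := by
  induction plancher with
  | nil => intro i acc _; simp [pvALoop, pvCountOccupied]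
  | cons v rest ih =>
    intro i acc hle
    by_cases hv : v = 0
    · simp [pvALoop, pvCountOccupied, hv]
    · have hc : pvCountOccupied (v :: rest) = 1 + pvCountOccupied rest := by
        simp [pvCountOccupied, hv]
      rw [hc] at hle ⊢
      have hi7 : i < 7 := by omega
      rw [pvALoop, if_pos hv, ih (i + 1) _ (by omega), pvTable_step i hi7]
      have : i + (1 + pvCountOccupied rest) = i + 1 + pvCountOccupied rest := by omega
      rw [this]
      ring

-- ===== VERDICT (by name: the statement is the Claim_ definition above) =====
theorem compte_point_plancher_spec : Claim_equal_compte_point_plancher := by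
  intro plancher point_plancher _ hpre
  unfold Spec_compte_point_plancher compte_point_plancher compte_point_plancher_alt
  have hcnt : pvCountOccupied plancher ≤ 7 := by
    by_contra h
    exact hpre (pvCount_ge 8 plancher (by omega))
  rw [pvALoop_eq plancher 0 point_plancher (by omega)]
  simp [pvCumTable, PySem.List.pyGetD, PySem.List.pyGet?, PySem.List.pyIdx?]
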